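-- pv_equiv track=rewrite | github.com/Ahamedshakir02/kerala-police-ai | backend/app/services/nlp_service.py | _get_risk
-- ===== SOURCE A (Python) =====
-- from typing import Dict, Any, List, Optional
--
-- def _get_risk(sections: List[str]) -> str:
--     critical = {"302", "376", "395", "304B"}
--     high = {"307", "304", "380", "392", "363", "366", "498A"}
--     medium = {"354", "420", "406", "436", "66 IT Act", "20 NDPS Act", "22 NDPS Act"}
--     if any(s in critical for s in sections):
--         return "critical"
--     if any(s in high for s in sections):
--         return "high"
--     if any(s in medium for s in sections):
--         return "medium"
--     return "low"
-- ===== SOURCE B (Python) =====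
-- _RANK = {"302": 3, "376": 3, "395": 3, "304B": 3,
--          "307": 2, "304": 2, "380": 2, "392": 2, "363": 2, "366": 2, "498A": 2,
--          "354": 1, "420": 1, "406": 1, "436": 1,
--          "66 IT Act": 1, "20 NDPS Act": 1, "22 NDPS Act": 1}
--
-- def _get_risk(sections):
--     r = 0
--     for s in sections:
--         r = max(r, _RANK.get(s, 0))
--     return "critical" if r == 3 else "high" if r == 2 else "medium" if r == 1 else "low"
-- ===== Notes on version B (the rewrite author's own statement) =====
-- stated objective: simpler
-- what changed: Replaced the three ordered any()-scans over separate severity sets by one rank table and a single pass keeping a running maximum rank, mapped back to a label at the end.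
import Mathlib
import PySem

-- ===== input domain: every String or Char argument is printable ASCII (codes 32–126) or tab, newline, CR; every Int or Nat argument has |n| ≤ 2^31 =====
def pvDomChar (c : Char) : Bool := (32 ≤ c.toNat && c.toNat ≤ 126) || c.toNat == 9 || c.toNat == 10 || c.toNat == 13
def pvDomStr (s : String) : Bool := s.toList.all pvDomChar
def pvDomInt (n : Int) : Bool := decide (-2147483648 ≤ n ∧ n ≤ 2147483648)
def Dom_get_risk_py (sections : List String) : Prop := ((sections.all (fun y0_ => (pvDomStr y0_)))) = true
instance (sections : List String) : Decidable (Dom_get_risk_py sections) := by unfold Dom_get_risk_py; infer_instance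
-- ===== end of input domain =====

-- B replaces A's three ordered any()-scans over severity sets by one rank table,
-- a single running-maximum pass, and a final rank→label mapping (objective: simpler).


-- ===== PORT A =====
def get_risk_py (sections : List String) : String :=
  let critical : PySem.Set String := PySem.Set.ofList ["302", "376", "395", "304B"]
  let high : PySem.Set String := PySem.Set.ofList ["307", "304", "380", "392", "363", "366", "498A"]
  let medium : PySem.Set String := PySem.Set.ofList ["354", "420", "406", "436", "66 IT Act", "20 NDPS Act", "22 NDPS Act"]
  if sections.any (fun s => PySem.Set.contains critical s) then "critical"
  else if sections.any (fun s => PySem.Set.contains high s) then "high"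
  else if sections.any (fun s => PySem.Set.contains medium s) then "medium"
  else "low"

-- ===== PORT B =====
def pvRank : PySem.Dict String Int := PySem.Dict.ofList
  [("302", 3), ("376", 3), ("395", 3), ("304B", 3),
   ("307", 2), ("304", 2), ("380", 2), ("392", 2), ("363", 2), ("366", 2), ("498A", 2),
   ("354", 1), ("420", 1), ("406", 1), ("436", 1),
   ("66 IT Act", 1), ("20 NDPS Act", 1), ("22 NDPS Act", 1)]

def get_risk_py_alt (sections : List String) : String :=
  let r := sections.foldl (fun r s => max r (PySem.Dict.getD pvRank s 0)) 0
  if r == 3 then "critical" else if r == 2 then "high" else if r == 1 then "medium" else "low"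

-- ===== PRECONDITION & SPEC =====
def Spec_get_risk_py (sections : List String) (out : String) : Prop := out = get_risk_py_alt sections
instance (sections : List String) (out : String) : Decidable (Spec_get_risk_py sections out) := by unfold Spec_get_risk_py; infer_instance

-- ===== CLAIM (what is proved, stated in full; the proofs are below) =====
def Claim_equal_get_risk_py : Prop := ∀ (sections : List String), Dom_get_risk_py sections → Spec_get_risk_py sections (get_risk_py sections)

-- ===== LEMMAS AND PROOFS =====

def pvRk (s : String) : Int := PySem.Dict.getD pvRank s 0
def pvM (l : List String) : Int := l.foldl (fun r s => max r (pvRk s)) 0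

def pvCrit : List String := ["302", "376", "395", "304B"]
def pvHigh : List String := ["307", "304", "380", "392", "363", "366", "498A"]
def pvMed : List String := ["354", "420", "406", "436", "66 IT Act", "20 NDPS Act", "22 NDPS Act"]

set_option maxRecDepth 8000 in
lemma pvRk_if (s : String) :
    pvRk s = if pvCrit.contains s then 3 else if pvHigh.contains s then 2
             else if pvMed.contains s then 1 else 0 := by
  by_cases h1 : s = "302"; · subst h1; decide
  by_cases h2 : s = "376"; · subst h2; decide
  by_cases h3 : s = "395"; · subst h3; decide
  by_cases h4 : s = "304B"; · subst h4; decide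
  by_cases h5 : s = "307"; · subst h5; decide
  by_cases h6 : s = "304"; · subst h6; decide
  by_cases h7 : s = "380"; · subst h7; decide
  by_cases h8 : s = "392"; · subst h8; decide
  by_cases h9 : s = "363"; · subst h9; decide
  by_cases h10 : s = "366"; · subst h10; decide
  by_cases h11 : s = "498A"; · subst h11; decide
  by_cases h12 : s = "354"; · subst h12; decide
  by_cases h13 : s = "420"; · subst h13; decide
  by_cases h14 : s = "406"; · subst h14; decide
  by_cases h15 : s = "436"; · subst h15; decide
  by_cases h16 : s = "66 IT Act"; · subst h16; decide
  by_cases h17 : s = "20 NDPS Act"; · subst h17; decide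
  by_cases h18 : s = "22 NDPS Act"; · subst h18; decide
  rw [if_neg (by simp [pvCrit, h1, h2, h3, h4]),
      if_neg (by simp [pvHigh, h5, h6, h7, h8, h9, h10, h11]),
      if_neg (by simp [pvMed, h12, h13, h14, h15, h16, h17, h18])]
  have hkeys : pvRank.keys = ["302", "376", "395", "304B", "307", "304", "380", "392",
      "363", "366", "498A", "354", "420", "406", "436",
      "66 IT Act", "20 NDPS Act", "22 NDPS Act"] := by decide
  have hnone : pvRank.get? s = none := by
    rw [PySem.Dict.get?_eq_none_iff_not_mem_keys, hkeys]
    simp [h1, h2, h3, h4, h5, h6, h7, h8, h9, h10, h11, h12, h13, h14, h15, h16, h17, h18]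
  simp [pvRk, PySem.Dict.getD, hnone]

lemma pvRk_bounds (s : String) : 0 ≤ pvRk s ∧ pvRk s ≤ 3 := by
  rw [pvRk_if]; split_ifs <;> omega

lemma pvM_shift (l : List String) : ∀ (a : Int), 0 ≤ a →
    l.foldl (fun r s => max r (pvRk s)) a = max a (pvM l) := by
  induction l with
  | nil => intro a ha; simp only [pvM, List.foldl_nil]; omega
  | cons x xs ih =>
    intro a ha
    have hx := (pvRk_bounds x).1
    have e1 := ih (max a (pvRk x)) (by omega)
    have e2 := ih (max 0 (pvRk x)) (by omega)
    simp only [pvM, List.foldl_cons] at e1 e2 ⊢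
    omega

lemma pvM_cons (x : String) (l : List String) : pvM (x :: l) = max (pvRk x) (pvM l) := by
  have hx := (pvRk_bounds x).1
  have e := pvM_shift l (max 0 (pvRk x)) (by omega)
  simp only [pvM, List.foldl_cons] at e ⊢
  omega

lemma pvM_bounds (l : List String) : 0 ≤ pvM l ∧ pvM l ≤ 3 := by
  induction l with
  | nil => simp [pvM]
  | cons x xs ih =>
    rw [pvM_cons]
    have := pvRk_bounds x
    omega

lemma pv_any_crit (l : List String) :
    l.any (fun s => pvCrit.contains s) = decide (3 ≤ pvM l) := by
  induction l with
  | nil => simp [pvM]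
  | cons x xs ih =>
    have hM := pvM_bounds xs
    rw [List.any_cons, ih, pvM_cons, pvRk_if x]
    cases e : pvCrit.contains x <;> simp only [Bool.false_or, Bool.true_or] <;>
      split_ifs <;> simp_all <;> omega

lemma pv_any_high (l : List String) :
    ((l.any (fun s => pvCrit.contains s) || l.any (fun s => pvHigh.contains s)))
      = decide (2 ≤ pvM l) := by
  induction l with
  | nil => simp [pvM]
  | cons x xs ih =>
    have hM := pvM_bounds xs
    rw [List.any_cons, List.any_cons]
    have hre : ((pvCrit.contains x || List.any xs fun s => pvCrit.contains s) ||
               (pvHigh.contains x || List.any xs fun s => pvHigh.contains s))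
             = ((pvCrit.contains x || pvHigh.contains x) ||
                ((List.any xs fun s => pvCrit.contains s) || List.any xs fun s => pvHigh.contains s)) := by
      cases pvCrit.contains x <;> cases pvHigh.contains x <;> simp
    rw [hre, ih, pvM_cons, pvRk_if x]
    cases ec : pvCrit.contains x <;> cases eh : pvHigh.contains x <;>
      simp only [Bool.false_or, Bool.true_or, Bool.or_true, Bool.or_false] <;>
      split_ifs <;> simp_all <;> omega

lemma pv_any_med (l : List String) :
    (((l.any (fun s => pvCrit.contains s) || l.any (fun s => pvHigh.contains s))
       || l.any (fun s => pvMed.contains s)))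
      = decide (1 ≤ pvM l) := by
  induction l with
  | nil => simp [pvM]
  | cons x xs ih =>
    have hM := pvM_bounds xs
    rw [List.any_cons, List.any_cons, List.any_cons]
    have hre : (((pvCrit.contains x || List.any xs fun s => pvCrit.contains s) ||
               (pvHigh.contains x || List.any xs fun s => pvHigh.contains s)) ||
               (pvMed.contains x || List.any xs fun s => pvMed.contains s))
             = (((pvCrit.contains x || pvHigh.contains x) || pvMed.contains x) ||
                (((List.any xs fun s => pvCrit.contains s) || List.any xs fun s => pvHigh.contains s)
                  || List.any xs fun s => pvMed.contains s)) := by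
      cases pvCrit.contains x <;> cases pvHigh.contains x <;> cases pvMed.contains x <;> simp
    rw [hre, ih, pvM_cons, pvRk_if x]
    cases ec : pvCrit.contains x <;> cases eh : pvHigh.contains x <;> cases em : pvMed.contains x <;>
      simp only [Bool.false_or, Bool.true_or, Bool.or_true, Bool.or_false] <;>
      split_ifs <;> simp_all <;> omega

lemma pv_setCrit : PySem.Set.ofList pvCrit = pvCrit := by decide
lemma pv_setHigh : PySem.Set.ofList pvHigh = pvHigh := by decide
lemma pv_setMed : PySem.Set.ofList pvMed = pvMed := by decide

-- ===== VERDICT (by name: the statement is the Claim_ definition above) =====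
theorem get_risk_py_spec : Claim_equal_get_risk_py := by
  intro l _
  unfold Spec_get_risk_py get_risk_py get_risk_py_alt
  simp only [show PySem.Set.ofList ["302", "376", "395", "304B"] = pvCrit from pv_setCrit,
             show PySem.Set.ofList ["307", "304", "380", "392", "363", "366", "498A"] = pvHigh from pv_setHigh,
             show PySem.Set.ofList ["354", "420", "406", "436", "66 IT Act", "20 NDPS Act", "22 NDPS Act"] = pvMed from pv_setMed,
             PySem.Set.contains_eq_listContains]
  have hM : (l.foldl (fun r s => max r (PySem.Dict.getD pvRank s 0)) 0) = pvM l := rfl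
  rw [hM]
  have h3 := pv_any_crit l
  have h2 := pv_any_high l
  have h1 := pv_any_med l
  have hb := pvM_bounds l
  cases e3 : (l.any fun s => pvCrit.contains s) <;>
  cases e2 : (l.any fun s => pvHigh.contains s) <;>
  cases e1 : (l.any fun s => pvMed.contains s) <;>
    simp only [e3, e2, e1, Bool.true_or, Bool.false_or, Bool.or_true, Bool.or_false] at h3 h2 h1 <;>
    replace h3 := h3.symm <;> replace h2 := h2.symm <;> replace h1 := h1.symm <;>
    simp only [decide_eq_true_eq, decide_eq_false_iff_not] at h3 h2 h1
  case false.false.false =>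
    have hv : pvM l = 0 := by omega
    simp [e3, e2, e1, hv]
  case false.false.true =>
    have hv : pvM l = 1 := by omega
    simp [e3, e2, e1, hv]
  case false.true.false =>
    have hv : pvM l = 2 := by omega
    simp [e3, e2, e1, hv]
  case false.true.true =>
    have hv : pvM l = 2 := by omega
    simp [e3, e2, e1, hv]
  case true.false.false =>
    have hv : pvM l = 3 := by omega
    simp [e3, e2, e1, hv]
  case true.false.true =>
    have hv : pvM l = 3 := by omega
    simp [e3, e2, e1, hv]
  case true.true.false =>
    have hv : pvM l = 3 := by omega
    simp [e3, e2, e1, hv]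
  case true.true.true =>
    have hv : pvM l = 3 := by omega
    simp [e3, e2, e1, hv]
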